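-- pv_equiv track=rewrite | github.com/rsprenkels/kattis | python/1_6/prva.py | prva
-- ===== SOURCE A (Python) =====
-- def prva(puzzle):
--     words = set()
--     for row in puzzle:
--         words.update(row.split('#'))
--     for col in range(len(puzzle[0])):
--         totcol = ''.join([puzzle[r][col] for r in range(len(puzzle))])
--         words.update(totcol.split('#'))
--     return sorted([word for word in words if len(word) >= 2])[0]
-- ===== SOURCE B (Python) =====
-- def prva(puzzle):
--     best = None
--     lines = list(puzzle)
--     for col in zip(*puzzle):
--         lines.append(''.join(col))
--     for line in lines:
--         for word in line.split('#'):
--             if len(word) >= 2 and (best is None or word < best):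
--                 best = word
--     if best is None:
--         raise IndexError('no word of length >= 2')
--     return best
-- ===== Notes on version B (the rewrite author's own statement) =====
-- stated objective: alternative
-- what changed: Instead of accumulating all row/column pieces into a set and sorting it to take the first element, B threads a single running-minimum variable through one scan of the rows and the zip(*puzzle) columns and returns it.
import Mathlib
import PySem

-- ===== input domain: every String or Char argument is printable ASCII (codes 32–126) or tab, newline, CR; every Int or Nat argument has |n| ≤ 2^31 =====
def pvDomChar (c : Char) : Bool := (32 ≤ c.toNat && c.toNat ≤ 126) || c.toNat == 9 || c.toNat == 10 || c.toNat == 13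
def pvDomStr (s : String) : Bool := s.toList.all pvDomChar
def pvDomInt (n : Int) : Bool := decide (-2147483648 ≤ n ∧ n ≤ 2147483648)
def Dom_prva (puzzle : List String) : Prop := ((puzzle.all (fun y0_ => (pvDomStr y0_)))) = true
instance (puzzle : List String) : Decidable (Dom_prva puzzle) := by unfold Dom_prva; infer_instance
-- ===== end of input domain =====

-- B replaces A's "collect every row/column piece into a set, sort, take [0]" by a single
-- running-minimum pass over the pieces of the rows and the zip(*puzzle) columns (objective:
-- alternative; return value only, neither version mutates its argument).

-- ===== PORT A =====
-- literal port of A; where Python raises (puzzle[0] on an empty puzzle, puzzle[r][col] on a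
-- row shorter than row 0, sorted([...])[0] when no piece has length >= 2) the PySem primitive
-- yields none and a default is taken — exactly those inputs are excluded by Pre_prva.
def prva (puzzle : List String) : String :=
  let grid : List (List Char) := puzzle.map String.toList
  let words0 : PySem.Set (List Char) :=
    grid.foldl (fun w row => PySem.Set.update w (PySem.Chars.splitOn row ['#'])) PySem.Set.empty
  let words : PySem.Set (List Char) :=
    (List.range (grid.headD []).length).foldl (fun w (col : Nat) =>
      let totcol : List Char :=
        grid.map (fun row => (PySem.List.pyGet? row (col : Int)).getD ' ')
      PySem.Set.update w (PySem.Chars.splitOn totcol ['#'])) words0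
  String.ofList
    ((PySem.List.pyGet?
        (PySem.List.sorted (words.filter (fun word => decide (2 ≤ word.length))) (fun x => x) false)
        0).getD [])

-- ===== PORT B =====
-- zip(*puzzle): the columns, truncated to the shortest row
def pvZipStar (rows : List (List Char)) : List (List Char) :=
  match rows with
  | [] => []
  | r :: rs =>
    (List.range (rs.foldl (fun m row => min m row.length) r.length)).map
      (fun c => (r :: rs).map (fun row => (row[c]?).getD ' '))

-- one step of B's running minimum: `if len(word) >= 2 and (best is None or word < best)`
def pvStep (best : Option (List Char)) (w : List Char) : Option (List Char) :=
  if 2 ≤ w.length && (match best with | none => true | some b => decide (w < b)) then some w else best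

def prva_alt (puzzle : List String) : String :=
  let grid : List (List Char) := puzzle.map String.toList
  let lines : List (List Char) := grid ++ pvZipStar grid
  let best : Option (List Char) :=
    lines.foldl (fun best line => (PySem.Chars.splitOn line ['#']).foldl pvStep best) none
  String.ofList (best.getD [])   -- best = none: Python B raises IndexError (outside Pre_prva)

-- ===== PRECONDITION & SPEC =====
-- specification helpers (used only by Pre_ and the proofs, not by the ports):
-- the columns of the grid, and the list of all row/column pieces split on '#'
def pvCols (puzzle : List String) : List (List Char) :=
  (List.range (puzzle.headD "").toList.length).map
    (fun c => puzzle.map (fun row => (row.toList[c]?).getD ' '))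
def pvWords (puzzle : List String) : List (List Char) :=
  (puzzle.map String.toList ++ pvCols puzzle).flatMap (fun line => PySem.Chars.splitOn line ['#'])

-- Pre_ excludes exactly the inputs on which A raises an IndexError: the empty puzzle
-- (puzzle[0]), a row shorter than row 0 (puzzle[r][col]), and grids in which no row/column
-- piece has length ≥ 2 (sorted([...])[0] on the empty list).
def Pre_prva (puzzle : List String) : Prop :=
  puzzle ≠ [] ∧ (∀ row ∈ puzzle, (puzzle.headD "").toList.length ≤ row.toList.length) ∧
    ∃ w ∈ pvWords puzzle, 2 ≤ w.length
instance (puzzle : List String) : Decidable (Pre_prva puzzle) := by unfold Pre_prva; infer_instance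

def pvWitness_prva : List String := (["ab", "cd"])

def Spec_prva (puzzle : List String) (out : String) : Prop := out = prva_alt puzzle
instance (puzzle : List String) (out : String) : Decidable (Spec_prva puzzle out) := by unfold Spec_prva; infer_instance

-- ===== CLAIM (what is proved, stated in full; the proofs are below) =====
def Claim_equal_prva : Prop := ∀ (puzzle : List String), Dom_prva puzzle → Pre_prva puzzle → Spec_prva puzzle (prva puzzle)

-- ===== LEMMAS AND PROOFS =====

-- membership in a fold of Set.update
theorem pv_mem_foldl_update {β : Type} (l : List β) (f : β → List (List Char))
    (s : PySem.Set (List Char)) (y : List Char) :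
    y ∈ l.foldl (fun w b => PySem.Set.update w (f b)) s ↔ y ∈ s ∨ ∃ b ∈ l, y ∈ f b := by
  induction l generalizing s with
  | nil => simp
  | cons x t ih =>
    simp only [List.foldl_cons, ih, PySem.Set.mem_update, List.mem_cons]
    constructor
    · rintro ((h | h) | ⟨b, hb, hy⟩)
      · exact Or.inl h
      · exact Or.inr ⟨x, Or.inl rfl, h⟩
      · exact Or.inr ⟨b, Or.inr hb, hy⟩
    · rintro (h | ⟨b, (rfl | hb), hy⟩)
      · exact Or.inl (Or.inl h)
      · exact Or.inl (Or.inr hy)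
      · exact Or.inr ⟨b, hb, hy⟩

-- A's result is the minimum piece of length ≥ 2
theorem pv_A_char (puzzle : List String) (h : Pre_prva puzzle) :
    ∃ m, prva puzzle = String.ofList m ∧ (m ∈ pvWords puzzle ∧ 2 ≤ m.length) ∧
      ∀ y ∈ pvWords puzzle, 2 ≤ y.length → m ≤ y := by
  obtain ⟨hne, hlen, w0, hw0, hw02⟩ := h
  simp only [prva]
  set grid := puzzle.map String.toList with hgrid
  have hrange : (grid.headD []).length = (puzzle.headD "").toList.length := by
    cases puzzle <;> simp [hgrid]
  set words : PySem.Set (List Char) :=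
    (List.range (grid.headD []).length).foldl (fun w (col : Nat) =>
      PySem.Set.update w (PySem.Chars.splitOn
        (grid.map (fun row => (PySem.List.pyGet? row (col : Int)).getD ' ')) ['#']))
      (grid.foldl (fun w row => PySem.Set.update w (PySem.Chars.splitOn row ['#'])) PySem.Set.empty)
    with hwords
  have hcol : ∀ c : Nat, grid.map (fun row => (PySem.List.pyGet? row (c : Int)).getD ' ')
      = puzzle.map (fun row => (row.toList[c]?).getD ' ') := by
    intro c
    simp [hgrid, List.map_map, Function.comp, PySem.List.pyGet?_natCast]
  have hmem : ∀ y, y ∈ words ↔ y ∈ pvWords puzzle := by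
    intro y
    rw [hwords, pv_mem_foldl_update, pv_mem_foldl_update, hrange]
    simp only [PySem.Set.empty, List.not_mem_nil, false_or]
    unfold pvWords pvCols
    rw [List.mem_flatMap]
    constructor
    · rintro (⟨r, hr, hy⟩ | ⟨c, hc, hy⟩)
      · exact ⟨r, List.mem_append_left _ hr, hy⟩
      · refine ⟨puzzle.map (fun row => (row.toList[c]?).getD ' '), List.mem_append_right _ ?_, ?_⟩
        · exact List.mem_map_of_mem hc
        · rw [← hcol c]; exact hy
    · rintro ⟨line, hline, hy⟩
      rcases List.mem_append.mp hline with hl | hl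
      · exact Or.inl ⟨line, hl, hy⟩
      · obtain ⟨c, hc, rfl⟩ := List.mem_map.mp hl
        refine Or.inr ⟨c, hc, ?_⟩
        rw [hcol c]; exact hy
  set Fs := words.filter (fun word => decide (2 ≤ word.length)) with hFs
  have hmemF : ∀ y, y ∈ Fs ↔ y ∈ pvWords puzzle ∧ 2 ≤ y.length := by
    intro y; rw [hFs, List.mem_filter, hmem]; simp
  have hne' : Fs ≠ [] := by
    intro hemp
    have := (hmemF w0).mpr ⟨hw0, hw02⟩
    rw [hemp] at this; exact List.not_mem_nil this
  have hsne : PySem.List.sorted Fs (fun x => x) false ≠ [] := by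
    rw [Ne, PySem.List.sorted_eq_nil_iff]; exact hne'
  obtain ⟨m, t, hst⟩ := List.exists_cons_of_ne_nil hsne
  refine ⟨m, ?_, ?_, ?_⟩
  · rw [hst, PySem.List.pyGet?_zero_cons]; rfl
  · have : m ∈ Fs := (PySem.List.mem_sorted Fs _ false m).mp (by rw [hst]; exact List.mem_cons_self)
    exact (hmemF m).mp this
  · intro y hy hy2
    have hdec : (fun (a b : List Char) => a.decidableLT b) = (LinearOrder.toDecidableLT : DecidableLT (List Char)) :=
      Subsingleton.elim _ _
    rw [show (PySem.List.sorted Fs (fun x => x) false = m :: t) =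
        (@PySem.List.sorted _ _ _ LinearOrder.toDecidableLT Fs (fun x => x) false = m :: t) from by
      rw [← hdec]] at hst
    exact PySem.List.key_head_sorted_le Fs (fun x => x) hst y ((hmemF y).mpr ⟨hy, hy2⟩)

-- B's nested fold is the fold over the concatenated pieces
theorem pv_foldl_flatMap (lines : List (List Char)) (acc : Option (List Char)) :
    lines.foldl (fun b line => (PySem.Chars.splitOn line ['#']).foldl pvStep b) acc
      = (lines.flatMap (fun line => PySem.Chars.splitOn line ['#'])).foldl pvStep acc := by
  induction lines generalizing acc with
  | nil => rfl
  | cons x t ih => simp [List.foldl_cons, List.flatMap_cons, List.foldl_append, ih]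

theorem pv_foldl_min {β : Type} (l : List β) (f : β → Nat) (a : Nat) (h : ∀ x ∈ l, a ≤ f x) :
    l.foldl (fun m x => min m (f x)) a = a := by
  induction l with
  | nil => rfl
  | cons x t ih =>
    simp only [List.foldl_cons]
    rw [min_eq_left (h x List.mem_cons_self)]
    exact ih (fun y hy => h y (List.mem_cons_of_mem _ hy))

-- under Pre_, zip(*puzzle) yields exactly the columns A reads
theorem pv_zip_eq_cols (puzzle : List String) (hne : puzzle ≠ [])
    (hlen : ∀ row ∈ puzzle, (puzzle.headD "").toList.length ≤ row.toList.length) :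
    pvZipStar (puzzle.map String.toList) = pvCols puzzle := by
  cases puzzle with
  | nil => exact absurd rfl hne
  | cons p ps =>
    simp only [List.map_cons, pvZipStar, pvCols]
    have hmin : (ps.map String.toList).foldl (fun m row => min m row.length) p.toList.length
        = p.toList.length := by
      rw [List.foldl_map]
      exact pv_foldl_min ps _ _ (fun x hx => by
        simpa using hlen x (List.mem_cons_of_mem _ hx))
    rw [hmin]
    simp [List.map_map, Function.comp, List.headD]

-- the running-minimum invariant of B's loop
theorem pv_runmin (P : List (List Char)) :
    ∀ (acc : Option (List Char)) (m : List Char), P.foldl pvStep acc = some m →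
      (acc = some m ∨ (m ∈ P ∧ 2 ≤ m.length ∧ ∀ b, acc = some b → m < b)) ∧
      (∀ y ∈ P, 2 ≤ y.length → m ≤ y) := by
  induction P with
  | nil => intro acc m h; simp at h; exact ⟨Or.inl (by rw [h]), by simp⟩
  | cons w t ih =>
    intro acc m h
    simp only [List.foldl_cons] at h
    cases acc with
    | none =>
      by_cases hw : 2 ≤ w.length
      · have hs : pvStep none w = some w := by simp [pvStep, hw]
        rw [hs] at h
        obtain ⟨h1, h2⟩ := ih _ _ h
        have hmlew : m ≤ w := by
          rcases h1 with h1 | ⟨_, _, hlt⟩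
          · exact le_of_eq (Option.some.inj h1).symm
          · exact le_of_lt (hlt w rfl)
        constructor
        · rcases h1 with h1 | ⟨hmem, hm2, _⟩
          · have hmw : m = w := (Option.some.inj h1).symm
            subst hmw
            exact Or.inr ⟨List.mem_cons_self, hw, by simp⟩
          · exact Or.inr ⟨List.mem_cons_of_mem _ hmem, hm2, by simp⟩
        · intro y hy hy2
          rcases List.mem_cons.mp hy with rfl | hy
          · exact hmlew
          · exact h2 y hy hy2
      · have hs : pvStep none w = none := by simp [pvStep]; omega
        rw [hs] at h
        obtain ⟨h1, h2⟩ := ih _ _ h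
        constructor
        · rcases h1 with h1 | ⟨hmem, hm2, hlt⟩
          · exact Or.inl h1
          · exact Or.inr ⟨List.mem_cons_of_mem _ hmem, hm2, hlt⟩
        · intro y hy hy2
          rcases List.mem_cons.mp hy with rfl | hy
          · exact absurd hy2 hw
          · exact h2 y hy hy2
    | some b0 =>
      by_cases hg : 2 ≤ w.length ∧ w < b0
      · have hs : pvStep (some b0) w = some w := by simp [pvStep, hg.1, hg.2]
        rw [hs] at h
        obtain ⟨h1, h2⟩ := ih _ _ h
        have hmlew : m ≤ w := by
          rcases h1 with h1 | ⟨_, _, hlt⟩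
          · exact le_of_eq (Option.some.inj h1).symm
          · exact le_of_lt (hlt w rfl)
        constructor
        · rcases h1 with h1 | ⟨hmem, hm2, hlt⟩
          · have hmw : m = w := (Option.some.inj h1).symm
            subst hmw
            exact Or.inr ⟨List.mem_cons_self, hg.1, fun b hb => by cases hb; exact hg.2⟩
          · refine Or.inr ⟨List.mem_cons_of_mem _ hmem, hm2, fun b hb => ?_⟩
            cases hb
            exact lt_trans (hlt w rfl) hg.2
        · intro y hy hy2
          rcases List.mem_cons.mp hy with rfl | hy
          · exact hmlew
          · exact h2 y hy hy2
      · have hs : pvStep (some b0) w = some b0 := by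
          simp only [pvStep]
          rw [if_neg]
          simp only [Bool.and_eq_true, decide_eq_true_eq]
          exact fun ⟨a, b⟩ => hg ⟨a, b⟩
        rw [hs] at h
        obtain ⟨h1, h2⟩ := ih _ _ h
        have hmleb : m ≤ b0 := by
          rcases h1 with h1 | ⟨_, _, hlt⟩
          · exact le_of_eq (Option.some.inj h1).symm
          · exact le_of_lt (hlt b0 rfl)
        constructor
        · rcases h1 with h1 | ⟨hmem, hm2, hlt⟩
          · exact Or.inl h1
          · exact Or.inr ⟨List.mem_cons_of_mem _ hmem, hm2, hlt⟩
        · intro y hy hy2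
          rcases List.mem_cons.mp hy with rfl | hy
          · have : ¬ y < b0 := fun hlt => hg ⟨hy2, hlt⟩
            exact le_trans hmleb (le_of_not_gt this)
          · exact h2 y hy hy2

-- the fold yields `some` as soon as a qualifying piece exists
theorem pv_runmin_some (P : List (List Char)) :
    ∀ (acc : Option (List Char)), (acc ≠ none ∨ ∃ y ∈ P, 2 ≤ y.length) →
      P.foldl pvStep acc ≠ none := by
  induction P with
  | nil => intro acc h; simpa using h
  | cons w t ih =>
    intro acc h
    simp only [List.foldl_cons]
    apply ih
    cases acc with
    | some b => left; simp only [pvStep]; split <;> simp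
    | none =>
      rcases h with h | ⟨y, hy, hy2⟩
      · exact absurd rfl h
      · rcases List.mem_cons.mp hy with rfl | hy
        · left; simp [pvStep, hy2]
        · by_cases hw : 2 ≤ w.length
          · left; simp [pvStep, hw]
          · right; exact ⟨y, hy, hy2⟩

-- B's result is the minimum piece of length ≥ 2
theorem pv_B_char (puzzle : List String) (h : Pre_prva puzzle) :
    ∃ m, prva_alt puzzle = String.ofList m ∧ (m ∈ pvWords puzzle ∧ 2 ≤ m.length) ∧
      ∀ y ∈ pvWords puzzle, 2 ≤ y.length → m ≤ y := by
  obtain ⟨hne, hlen, w0, hw0, hw02⟩ := h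
  simp only [prva_alt]
  rw [pv_zip_eq_cols puzzle hne hlen, pv_foldl_flatMap]
  have hres : (pvWords puzzle).foldl pvStep none ≠ none :=
    pv_runmin_some (pvWords puzzle) none (Or.inr ⟨w0, hw0, hw02⟩)
  obtain ⟨m, hm⟩ : ∃ m, (pvWords puzzle).foldl pvStep none = some m :=
    Option.ne_none_iff_exists'.mp hres
  obtain ⟨h1, h2⟩ := pv_runmin (pvWords puzzle) none m hm
  rcases h1 with h1 | ⟨hmem, hm2, _⟩
  · exact absurd h1.symm (by simp)
  · refine ⟨m, ?_, ⟨hmem, hm2⟩, h2⟩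
    show String.ofList (((pvWords puzzle).foldl pvStep none).getD []) = String.ofList m
    rw [hm]
    rfl

-- ===== VERDICT (by name: the statement is the Claim_ definition above) =====
theorem prva_spec : Claim_equal_prva := by
  intro puzzle _ hpre
  unfold Spec_prva
  obtain ⟨mA, hA, ⟨hAm, hA2⟩, hAmin⟩ := pv_A_char puzzle hpre
  obtain ⟨mB, hB, ⟨hBm, hB2⟩, hBmin⟩ := pv_B_char puzzle hpre
  have : mA = mB := le_antisymm (hAmin mB hBm hB2) (hBmin mA hAm hA2)
  rw [hA, hB, this]
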